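-- pv_equiv track=rewrite | github.com/IGInspector/IGInspector | code/util.py | deduplicateArrays_illegal
-- ===== SOURCE A (Python) =====
-- def deduplicateArrays_illegal(arr: list, labels: list, tags: list):
--     result_set = set()
--     to_delete = []
--     labels_result = []
--     tags_result = []
--     for i, sub_arr in enumerate(arr):
--         sub_arr_tuple = tuple(sub_arr)
--         if sub_arr_tuple in result_set:
--             to_delete.append(i)
--         result_set.add(sub_arr_tuple)
--     for i in range(len(arr)):
--         if i not in to_delete:
--             labels_result.append(labels[i])
--             tags_result.append(tags[i])
--     result = [list(sub_arr) for sub_arr in result_set]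
--     result.sort(key=arr.index)
--     return result, labels_result, tags_result
-- ===== SOURCE B (Python) =====
-- def deduplicateArrays_illegal(arr: list, labels: list, tags: list):
--     seen = set()
--     result = []
--     labels_result = []
--     tags_result = []
--     for i, sub_arr in enumerate(arr):
--         t = tuple(sub_arr)
--         if t not in seen:
--             seen.add(t)
--             result.append(list(sub_arr))
--             labels_result.append(labels[i])
--             tags_result.append(tags[i])
--     return result, labels_result, tags_result
-- ===== Notes on version B (the rewrite author's own statement) =====
-- stated objective: simpler
-- what changed: B builds all three outputs in one pass with a seen-set, appending each first-occurrence sub-array and its label/tag directly, eliminating A's to_delete list, its second filtering loop over range(len(arr)), the set comprehension and the sort(key=arr.index).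
import Mathlib
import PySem

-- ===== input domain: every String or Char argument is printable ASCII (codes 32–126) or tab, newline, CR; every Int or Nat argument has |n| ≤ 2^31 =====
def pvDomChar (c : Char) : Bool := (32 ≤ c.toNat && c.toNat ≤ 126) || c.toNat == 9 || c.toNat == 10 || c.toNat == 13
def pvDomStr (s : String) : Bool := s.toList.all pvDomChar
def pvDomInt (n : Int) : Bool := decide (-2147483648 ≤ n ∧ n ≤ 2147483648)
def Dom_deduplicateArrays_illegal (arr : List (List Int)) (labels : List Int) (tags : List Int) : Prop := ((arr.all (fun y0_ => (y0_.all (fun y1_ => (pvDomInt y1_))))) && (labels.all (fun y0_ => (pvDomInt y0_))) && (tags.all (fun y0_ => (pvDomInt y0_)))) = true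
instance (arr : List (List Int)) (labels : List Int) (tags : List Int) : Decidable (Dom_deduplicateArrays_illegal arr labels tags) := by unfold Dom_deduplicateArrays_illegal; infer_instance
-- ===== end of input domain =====

-- B makes one pass appending each first-occurrence sub-array together with its label and tag,
-- removing A's to_delete list, its second filtering loop, the set comprehension and the sort(key=arr.index).

-- ===== PORT A =====
-- body of A's first loop: result_set membership test, to_delete append, result_set.add
def pvStepA (st : PySem.Set (List Int) × List Int) (p : Int × List Int) :
    PySem.Set (List Int) × List Int :=
  (PySem.Set.add st.1 p.2, if PySem.Set.contains st.1 p.2 then st.2 ++ [p.1] else st.2)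

-- body of A's second loop ('if i not in to_delete: append labels[i], tags[i]')
def pvStepL (labels tags toDelete : List Int) (acc : List Int × List Int) (i : Int) :
    List Int × List Int :=
  if ¬ (i ∈ toDelete) then
    (acc.1 ++ [PySem.List.pyGetD labels i 0], acc.2 ++ [PySem.List.pyGetD tags i 0])
  else acc

def deduplicateArrays_illegal (arr : List (List Int)) (labels : List Int) (tags : List Int) :
    List (List Int) × List Int × List Int :=
  let st := (PySem.List.enumerate arr 0).foldl pvStepA (PySem.Set.empty, [])
  let lt := (PySem.List.pyRange 0 arr.length 1).foldl (pvStepL labels tags st.2) ([], [])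
  -- result = [list(t) for t in result_set]; result.sort(key=arr.index)
  let result := PySem.List.sorted (st.1.map (fun t => t))
      (fun x => (PySem.List.index? arr x).getD 0) false
  (result, lt.1, lt.2)

-- ===== PORT B =====
-- body of B's single loop: on a fresh tuple, add to seen and append sub-array, label, tag
def pvStepB (labels tags : List Int)
    (st : PySem.Set (List Int) × List (List Int) × List Int × List Int) (p : Int × List Int) :
    PySem.Set (List Int) × List (List Int) × List Int × List Int :=
  if ¬ (PySem.Set.contains st.1 p.2 = true) then
    (PySem.Set.add st.1 p.2, st.2.1 ++ [p.2],
     st.2.2.1 ++ [PySem.List.pyGetD labels p.1 0],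
     st.2.2.2 ++ [PySem.List.pyGetD tags p.1 0])
  else st

def deduplicateArrays_illegal_alt (arr : List (List Int)) (labels : List Int) (tags : List Int) :
    List (List Int) × List Int × List Int :=
  let st := (PySem.List.enumerate arr 0).foldl (pvStepB labels tags)
    (PySem.Set.empty, [], [], [])
  (st.2.1, st.2.2.1, st.2.2.2)

-- ===== PRECONDITION & SPEC =====
-- Pre_ excludes exactly the inputs where Python A raises IndexError: labels[i] / tags[i]
-- is read at every first-occurrence index i, so those indices must be in range (B raises there too).
def Pre_deduplicateArrays_illegal (arr : List (List Int)) (labels : List Int) (tags : List Int) : Prop :=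
  ∀ k, k < arr.length → arr.getD k [] ∉ arr.take k → (k < labels.length ∧ k < tags.length)
instance (arr : List (List Int)) (labels : List Int) (tags : List Int) : Decidable (Pre_deduplicateArrays_illegal arr labels tags) := by unfold Pre_deduplicateArrays_illegal; infer_instance

def pvWitness_deduplicateArrays_illegal : List (List Int) × List Int × List Int :=
  ([[1], [2, 3], [1]], [5, 6, 7], [8, 9, 10])

def Spec_deduplicateArrays_illegal (arr : List (List Int)) (labels : List Int) (tags : List Int) (out : List (List Int) × List Int × List Int) : Prop := out = deduplicateArrays_illegal_alt arr labels tags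
instance (arr : List (List Int)) (labels : List Int) (tags : List Int) (out : List (List Int) × List Int × List Int) : Decidable (Spec_deduplicateArrays_illegal arr labels tags out) := by unfold Spec_deduplicateArrays_illegal; infer_instance

-- ===== CLAIM (what is proved, stated in full; the proofs are below) =====
def Claim_equal_deduplicateArrays_illegal : Prop := ∀ (arr : List (List Int)) (labels : List Int) (tags : List Int), Dom_deduplicateArrays_illegal arr labels tags → Pre_deduplicateArrays_illegal arr labels tags → Spec_deduplicateArrays_illegal arr labels tags (deduplicateArrays_illegal arr labels tags)

-- ===== LEMMAS AND PROOFS =====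

-- the first-insertion-order set is strictly increasing under the key arr.index
theorem pv_ofList_pairwise_index (arr : List (List Int)) :
    (PySem.Set.ofList arr).Pairwise
      (fun a b => ((PySem.List.index? arr a).getD 0 : Nat) < (PySem.List.index? arr b).getD 0) := by
  induction arr with
  | nil => simp [PySem.Set.ofList_nil]
  | cons x xs ih =>
    rw [PySem.Set.ofList_cons]
    constructor
    · intro b hb
      have hbx := (PySem.Set.mem_discard (PySem.Set.ofList xs) x b).1 hb
      have hbmem : b ∈ xs := (PySem.Set.mem_ofList xs b).1 hbx.1
      have h1 : PySem.List.index? (x :: xs) x = some 0 := PySem.List.index?_cons_self x xs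
      have h2 : PySem.List.index? (x :: xs) b = (PySem.List.index? xs b).map (· + 1) :=
        PySem.List.index?_cons_of_ne xs (fun h => hbx.2 h.symm)
      obtain ⟨k, hk⟩ := Option.isSome_iff_exists.1 ((PySem.List.index?_isSome_iff xs b).2 hbmem)
      rw [h1, h2, hk]
      simp
    · have hsub : (PySem.Set.discard (PySem.Set.ofList xs) x).Sublist (PySem.Set.ofList xs) := by
        simp only [PySem.Set.discard]
        exact List.filter_sublist
      refine ((ih.sublist hsub).imp_of_mem ?_)
      intro a b ha hb hlt
      have hax := (PySem.Set.mem_discard (PySem.Set.ofList xs) x a).1 ha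
      have hbx := (PySem.Set.mem_discard (PySem.Set.ofList xs) x b).1 hb
      have hamem : a ∈ xs := (PySem.Set.mem_ofList xs a).1 hax.1
      have hbmem : b ∈ xs := (PySem.Set.mem_ofList xs b).1 hbx.1
      have h2a : PySem.List.index? (x :: xs) a = (PySem.List.index? xs a).map (· + 1) :=
        PySem.List.index?_cons_of_ne xs (fun h => hax.2 h.symm)
      have h2b : PySem.List.index? (x :: xs) b = (PySem.List.index? xs b).map (· + 1) :=
        PySem.List.index?_cons_of_ne xs (fun h => hbx.2 h.symm)
      obtain ⟨ka, hka⟩ := Option.isSome_iff_exists.1 ((PySem.List.index?_isSome_iff xs a).2 hamem)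
      obtain ⟨kb, hkb⟩ := Option.isSome_iff_exists.1 ((PySem.List.index?_isSome_iff xs b).2 hbmem)
      rw [hka, hkb] at hlt
      rw [h2a, h2b, hka, hkb]
      simpa using hlt

-- grand invariant: A's two loops compute exactly B's one loop
theorem pv_grand (labels tags : List Int) (arr : List (List Int)) :
    ((PySem.List.enumerate arr 0).foldl pvStepA (PySem.Set.empty, [])).1
        = PySem.Set.ofList arr ∧
    ((PySem.List.enumerate arr 0).foldl (pvStepB labels tags) (PySem.Set.empty, [], [], [])).1
        = PySem.Set.ofList arr ∧
    ((PySem.List.enumerate arr 0).foldl (pvStepB labels tags) (PySem.Set.empty, [], [], [])).2.1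
        = PySem.Set.ofList arr ∧
    (∀ i ∈ ((PySem.List.enumerate arr 0).foldl pvStepA (PySem.Set.empty, [])).2,
        0 ≤ i ∧ i < (arr.length : Int)) ∧
    (PySem.List.pyRange 0 arr.length 1).foldl
        (pvStepL labels tags ((PySem.List.enumerate arr 0).foldl pvStepA (PySem.Set.empty, [])).2)
        ([], [])
      = (((PySem.List.enumerate arr 0).foldl (pvStepB labels tags) (PySem.Set.empty, [], [], [])).2.2.1,
         ((PySem.List.enumerate arr 0).foldl (pvStepB labels tags) (PySem.Set.empty, [], [], [])).2.2.2) := by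
  induction arr using List.reverseRecOn with
  | nil => simp [PySem.List.enumerate_nil, PySem.Set.ofList_nil, PySem.List.pyRange_one_eq_nil]
  | append_singleton xs x ih =>
    obtain ⟨hA, hB, hR, hBnd, hLT⟩ := ih
    have hen : PySem.List.enumerate (xs ++ [x]) 0
        = PySem.List.enumerate xs 0 ++ [((xs.length : Int), x)] := by
      rw [PySem.List.enumerate_append]
      simp [PySem.List.enumerate_cons, PySem.List.enumerate_nil]
    have hofl : PySem.Set.ofList (xs ++ [x]) = PySem.Set.add (PySem.Set.ofList xs) x :=
      PySem.Set.ofList_append_singleton xs x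
    have hlen : (((xs ++ [x]).length : Int)) = (xs.length : Int) + 1 := by simp
    have hrange : PySem.List.pyRange 0 ((xs ++ [x]).length) 1
        = PySem.List.pyRange 0 (xs.length) 1 ++ [(xs.length : Int)] := by
      rw [hlen]
      exact PySem.List.pyRange_one_succ_right (by positivity)
    rw [hen]
    simp only [List.foldl_append, List.foldl_cons, List.foldl_nil]
    by_cases hx : x ∈ xs
    · -- duplicate: A appends to to_delete, B skips
      have hxS : x ∈ PySem.Set.ofList xs := (PySem.Set.mem_ofList xs x).2 hx
      have hcontT : PySem.Set.contains (PySem.Set.ofList xs) x = true :=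
        (PySem.Set.contains_iff (PySem.Set.ofList xs) x).2 hxS
      have haddS : PySem.Set.add (PySem.Set.ofList xs) x = PySem.Set.ofList xs :=
        PySem.Set.add_of_mem hxS
      have hstepA : pvStepA ((PySem.List.enumerate xs 0).foldl pvStepA (PySem.Set.empty, []))
          ((xs.length : Int), x)
          = (PySem.Set.ofList xs,
             ((PySem.List.enumerate xs 0).foldl pvStepA (PySem.Set.empty, [])).2
               ++ [(xs.length : Int)]) := by
        rw [pvStepA]
        rw [hA, hcontT, haddS]
        simp
      have hstepB : pvStepB labels tags
          ((PySem.List.enumerate xs 0).foldl (pvStepB labels tags) (PySem.Set.empty, [], [], []))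
          ((xs.length : Int), x)
          = (PySem.List.enumerate xs 0).foldl (pvStepB labels tags)
              (PySem.Set.empty, [], [], []) := by
        rw [pvStepB]
        rw [hB, hcontT]
        simp
      rw [hstepA, hstepB]
      refine ⟨by rw [hofl, haddS], by rw [hofl, haddS]; exact hB,
              by rw [hofl, haddS]; exact hR, ?_, ?_⟩
      · intro i hi
        simp only [List.mem_append, List.mem_singleton] at hi
        rcases hi with hi | hi
        · have := hBnd i hi
          simp only [hlen]
          omega
        · subst hi
          simp only [hlen]
          omega
      · rw [hrange, List.foldl_append, List.foldl_cons, List.foldl_nil]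
        have hcongr : (PySem.List.pyRange 0 (xs.length) 1).foldl
            (pvStepL labels tags
              (((PySem.List.enumerate xs 0).foldl pvStepA (PySem.Set.empty, [])).2
                ++ [(xs.length : Int)])) ([], [])
            = (PySem.List.pyRange 0 (xs.length) 1).foldl
                (pvStepL labels tags
                  ((PySem.List.enumerate xs 0).foldl pvStepA (PySem.Set.empty, [])).2)
                ([], []) := by
          refine PySem.List.foldl_congr_mem _ _ _ _ ?_
          intro acc i hi
          have hilt : i < (xs.length : Int) := (PySem.List.mem_pyRange_one.1 hi).2
          have hne : ¬ i = (xs.length : Int) := by omega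
          simp only [pvStepL, List.mem_append, List.mem_singleton, hne, or_false]
        rw [hcongr, hLT]
        rw [pvStepL]
        have hmem : (xs.length : Int) ∈ ((PySem.List.enumerate xs 0).foldl pvStepA
            (PySem.Set.empty, [])).2 ++ [(xs.length : Int)] := by simp
        rw [if_neg (not_not_intro hmem)]
    · -- fresh: A records a new set element, B appends all three
      have hxS : x ∉ PySem.Set.ofList xs := fun h => hx ((PySem.Set.mem_ofList xs x).1 h)
      have hcontF : PySem.Set.contains (PySem.Set.ofList xs) x = false := by
        by_contra hc
        simp only [Bool.not_eq_false] at hc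
        exact hxS ((PySem.Set.contains_iff (PySem.Set.ofList xs) x).1 hc)
      have haddS : PySem.Set.add (PySem.Set.ofList xs) x = PySem.Set.ofList xs ++ [x] :=
        PySem.Set.add_of_not_mem hxS
      have hstepA : pvStepA ((PySem.List.enumerate xs 0).foldl pvStepA (PySem.Set.empty, []))
          ((xs.length : Int), x)
          = (PySem.Set.ofList xs ++ [x],
             ((PySem.List.enumerate xs 0).foldl pvStepA (PySem.Set.empty, [])).2) := by
        rw [pvStepA]
        rw [hA, hcontF, haddS]
        simp
      have hstepB : pvStepB labels tags
          ((PySem.List.enumerate xs 0).foldl (pvStepB labels tags) (PySem.Set.empty, [], [], []))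
          ((xs.length : Int), x)
          = (PySem.Set.ofList xs ++ [x],
             ((PySem.List.enumerate xs 0).foldl (pvStepB labels tags)
               (PySem.Set.empty, [], [], [])).2.1 ++ [x],
             ((PySem.List.enumerate xs 0).foldl (pvStepB labels tags)
               (PySem.Set.empty, [], [], [])).2.2.1
               ++ [PySem.List.pyGetD labels (xs.length : Int) 0],
             ((PySem.List.enumerate xs 0).foldl (pvStepB labels tags)
               (PySem.Set.empty, [], [], [])).2.2.2
               ++ [PySem.List.pyGetD tags (xs.length : Int) 0]) := by
        rw [pvStepB]
        rw [hB, hcontF, haddS]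
        simp
      rw [hstepA, hstepB]
      refine ⟨by rw [hofl, haddS], by rw [hofl, haddS],
              by rw [hofl, haddS, hR], ?_, ?_⟩
      · intro i hi
        have := hBnd i hi
        simp only [hlen]
        omega
      · rw [hrange, List.foldl_append, List.foldl_cons, List.foldl_nil, hLT]
        have hnmem : ¬ ((xs.length : Int)
            ∈ ((PySem.List.enumerate xs 0).foldl pvStepA (PySem.Set.empty, [])).2) := by
          intro h
          have := hBnd _ h
          omega
        rw [pvStepL]
        rw [if_pos hnmem]

-- ===== VERDICT (by name: the statement is the Claim_ definition above) =====
theorem deduplicateArrays_illegal_spec : Claim_equal_deduplicateArrays_illegal := by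
  intro arr labels tags _hdom _hpre
  unfold Spec_deduplicateArrays_illegal deduplicateArrays_illegal deduplicateArrays_illegal_alt
  obtain ⟨hA, _hB, hR, _hBnd, hLT⟩ := pv_grand labels tags arr
  simp only [hA, hLT]
  refine Prod.ext ?_ rfl
  simp only [List.map_id_fun', id]
  rw [hR]
  exact PySem.List.sorted_eq_of_perm_of_pairwise_lt _ _ _ (List.Perm.refl _)
    (pv_ofList_pairwise_index arr)
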